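-- pv_equiv track=rewrite | github.com/ZianConradie/WarEraCompanyOptimizer | main.py | optimize_damage
-- ===== SOURCE A (Python) =====
-- from collections import defaultdict
--
-- PRODUCT_RECIPES = {
--     # Ammo
--     "Light Ammo": {"Lead": 1},
--     "Medium Ammo": {"Lead": 1, "Steel": 1},
--     "Heavy Ammo": {"Lead": 1},
--     # Food
--     "Bread": {"Grain": 1},
--     "Steak": {"Livestock": 1},
--     "Cooked Fish": {"Fish": 1},
--     # Boost
--     "Pill": {"Mysterious Plant": 1},
--     # Money / Infrastructure
--     "Steel": {"Iron": 1},
--     "Concrete": {"Limestone": 1},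
-- }
--
-- FOOD_PRIORITY_PRODUCTS = ["Bread", "Steak", "Cooked Fish"]
--
-- AMMO_PRIORITY_PRODUCTS = ["Heavy Ammo", "Medium Ammo", "Light Ammo"]
--
-- MONEY_PRIORITY_PRODUCTS = ["Steel", "Concrete"]
--
-- def count_required_companies(plan, product):
--     """Count companies needed to ADD ONE MORE of product + its missing raw materials."""
--     needed = 1  # the product itself
--     for ingredient, amount in PRODUCT_RECIPES.get(product, {}).items():
--         if plan[ingredient] == 0:
--             needed += amount
--     return needed
--
-- def add_product(plan, product):
--     """Add ONE unit of product and its missing raw materials to plan."""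
--     plan[product] += 1
--     for req, amount in PRODUCT_RECIPES.get(product, {}).items():
--         if plan[req] == 0:
--             plan[req] += amount
--
-- def add_product_with_materials(plan, product):
--     """Add ONE unit of product AND ONE unit of each required raw material."""
--     plan[product] += 1
--     for req, amount in PRODUCT_RECIPES.get(product, {}).items():
--         plan[req] += amount
--
-- def optimize_damage(total_companies):
--     plan = defaultdict(int)
--     remaining_companies = total_companies
--
--     # 1. Food first
--     for food in FOOD_PRIORITY_PRODUCTS:
--         required_food_companies = count_required_companies(plan, food)
--         if required_food_companies <= remaining_companies:
--             add_product(plan, food)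
--             remaining_companies -= required_food_companies
--             break  # only one food
--
--     # 2. Ammo next
--     for ammo in AMMO_PRIORITY_PRODUCTS:
--         required_ammo_companies = count_required_companies(plan, ammo)
--         if required_ammo_companies <= remaining_companies:
--             add_product(plan, ammo)
--             remaining_companies -= required_ammo_companies
--             break  # only one ammo
--
--     # 3. Boost
--     needed_boost_companies = count_required_companies(plan, "Pill")
--     if needed_boost_companies <= remaining_companies:
--         add_product(plan, "Pill")
--         remaining_companies -= needed_boost_companies
--
--     # 4. Money - keep adding until we run out of companies
--     while remaining_companies > 0:
--         added = False
--         for product in MONEY_PRIORITY_PRODUCTS: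
--             # Cost is always 2: 1 for product + 1 for raw material
--             cost = 2
--             if cost <= remaining_companies:
--                 add_product_with_materials(plan, product)
--                 remaining_companies -= cost
--                 added = True
--                 break
--         if not added:
--             break
--
--     return plan
-- ===== SOURCE B (Python) =====
-- # Direct computation of the greedy plan: each tier (one food, one ammo, one boost)
-- # costs exactly 2 companies (product + its single raw material), and the leftover
-- # budget buys Steel+Iron pairs -- so the whole allocation is plain arithmetic.
-- def optimize_damage(total_companies):
--     plan = {}
--     remaining = total_companies
--     if remaining >= 2:                       # Bread + Grain
--         plan["Grain"] = 1
--         plan["Bread"] = 1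
--         remaining -= 2
--     if remaining >= 2:                       # Heavy Ammo + Lead
--         plan["Lead"] = 1
--         plan["Heavy Ammo"] = 1
--         remaining -= 2
--     if remaining >= 2:                       # Pill + Mysterious Plant
--         plan["Mysterious Plant"] = 1
--         plan["Pill"] = 1
--         remaining -= 2
--     pairs = remaining // 2                   # Steel+Iron pairs from the leftover budget
--     if pairs > 0:
--         plan["Steel"] = pairs
--         plan["Iron"] = pairs
--     return plan
-- ===== Notes on version B (the rewrite author's own statement) =====
-- stated objective: faster
-- what changed: The greedy cascade with its probing while-loop is replaced by plain arithmetic: each tier costs exactly 2 companies and the money loop becomes pairs = remaining // 2; Pre_ excludes negative company counts, outside the task's natural domain, where A returns a dict of zero-valued probe entries and B returns an empty plan.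
-- intended difference: For 0 <= total_companies < 6 A's returned plan contains spurious zero-valued raw-material entries left behind by defaultdict probes of unaffordable products, while B returns only the companies actually allocated; a plan should not list companies that produce nothing. — e.g. on optimize_damage(0): A returns [("Grain", 0), ("Livestock", 0), ("Fish", 0), ("Lead", 0), ("Steel", 0), ("Mysterious Plant", 0)], B returns []
import Mathlib
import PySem

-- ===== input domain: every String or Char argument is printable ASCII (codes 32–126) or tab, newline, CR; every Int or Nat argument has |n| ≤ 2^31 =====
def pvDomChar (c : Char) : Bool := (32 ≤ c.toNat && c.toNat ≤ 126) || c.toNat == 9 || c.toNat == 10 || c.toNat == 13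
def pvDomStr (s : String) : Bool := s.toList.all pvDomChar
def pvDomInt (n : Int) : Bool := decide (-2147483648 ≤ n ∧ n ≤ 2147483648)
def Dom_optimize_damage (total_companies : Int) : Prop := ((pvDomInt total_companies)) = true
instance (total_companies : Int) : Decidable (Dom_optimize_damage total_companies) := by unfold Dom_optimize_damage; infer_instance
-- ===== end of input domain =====

-- B computes the greedy plan by arithmetic (each tier costs 2; the money loop is one division); faster (O(1) vs O(n)).

-- ===== PORT A =====
-- PRODUCT_RECIPES.get(product, {})
def pvRecipe (p : String) : List (String × Int) :=
  if p == "Light Ammo" then [("Lead", 1)]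
  else if p == "Medium Ammo" then [("Lead", 1), ("Steel", 1)]
  else if p == "Heavy Ammo" then [("Lead", 1)]
  else if p == "Bread" then [("Grain", 1)]
  else if p == "Steak" then [("Livestock", 1)]
  else if p == "Cooked Fish" then [("Fish", 1)]
  else if p == "Pill" then [("Mysterious Plant", 1)]
  else if p == "Steel" then [("Iron", 1)]
  else if p == "Concrete" then [("Limestone", 1)]
  else []

-- defaultdict(int) read: plan[k] inserts k ↦ 0 when absent (exact defaultdict semantics)
def pvDDGet (d : PySem.Dict String Int) (k : String) : Int × PySem.Dict String Int :=
  match d.get? k with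
  | some v => (v, d)
  | none => (0, d.insert k 0)

-- count_required_companies (the defaultdict reads mutate plan, so the dict is threaded)
def pvCountRequired (plan : PySem.Dict String Int) (product : String) :
    Int × PySem.Dict String Int :=
  (pvRecipe product).foldl
    (fun st p =>
      let r := pvDDGet st.2 p.1
      (if r.1 = 0 then st.1 + p.2 else st.1, r.2))
    (1, plan)

-- add_product
def pvAddProduct (plan : PySem.Dict String Int) (product : String) : PySem.Dict String Int :=
  let r := pvDDGet plan product
  let d := r.2.insert product (r.1 + 1)
  (pvRecipe product).foldl
    (fun d p =>
      let r := pvDDGet d p.1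
      if r.1 = 0 then r.2.insert p.1 (r.1 + p.2) else r.2)
    d

-- add_product_with_materials
def pvAddProductWithMaterials (plan : PySem.Dict String Int) (product : String) :
    PySem.Dict String Int :=
  let r := pvDDGet plan product
  let d := r.2.insert product (r.1 + 1)
  (pvRecipe product).foldl
    (fun d p =>
      let r := pvDDGet d p.1
      r.2.insert p.1 (r.1 + p.2))
    d

-- a 'for … if cost ≤ remaining: …; break' priority loop (food / ammo sections)
def pvTryFirst (plan : PySem.Dict String Int) (rem : Int) :
    List String → PySem.Dict String Int × Int
  | [] => (plan, rem)
  | p :: rest =>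
      let r := pvCountRequired plan p
      if r.1 ≤ rem then (pvAddProduct r.2 p, rem - r.1)
      else pvTryFirst r.2 rem rest

-- the money while-loop (inner for over ["Steel", "Concrete"], cost 2, first fit breaks)
def pvMoneyLoop (plan : PySem.Dict String Int) (rem : Int) : PySem.Dict String Int :=
  if h : rem > 0 then
    if h2 : 2 ≤ rem then pvMoneyLoop (pvAddProductWithMaterials plan "Steel") (rem - 2)
    else if h3 : 2 ≤ rem then pvMoneyLoop (pvAddProductWithMaterials plan "Concrete") (rem - 2)
    else plan
  else plan
termination_by rem.toNat
decreasing_by all_goals omega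

def optimize_damage (total_companies : Int) : List (String × Int) :=
  let s1 := pvTryFirst PySem.Dict.empty total_companies ["Bread", "Steak", "Cooked Fish"]
  let s2 := pvTryFirst s1.1 s1.2 ["Heavy Ammo", "Medium Ammo", "Light Ammo"]
  let r := pvCountRequired s2.1 "Pill"
  let s3 := if r.1 ≤ s2.2 then (pvAddProduct r.2 "Pill", s2.2 - r.1) else (r.2, s2.2)
  (pvMoneyLoop s3.1 s3.2).items

-- ===== PORT B =====
def optimize_damage_alt (total_companies : Int) : List (String × Int) :=
  let plan : PySem.Dict String Int := PySem.Dict.empty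
  let rem := total_companies
  let st :=
    if rem ≥ 2 then (((plan.insert "Grain" 1).insert "Bread" 1), rem - 2) else (plan, rem)
  let st :=
    if st.2 ≥ 2 then (((st.1.insert "Lead" 1).insert "Heavy Ammo" 1), st.2 - 2) else st
  let st :=
    if st.2 ≥ 2 then (((st.1.insert "Mysterious Plant" 1).insert "Pill" 1), st.2 - 2) else st
  let pairs := PySem.Int.floordiv st.2 2
  let plan := if pairs > 0 then (st.1.insert "Steel" pairs).insert "Iron" pairs else st.1
  plan.items

-- ===== PRECONDITION & SPEC =====
-- Pre_ restricts to the task's natural domain, nonnegative company counts; on negative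
-- counts A returns a dict of zero-valued probe entries and B returns an empty plan.
def Pre_optimize_damage (total_companies : Int) : Prop := 0 ≤ total_companies
instance (total_companies : Int) : Decidable (Pre_optimize_damage total_companies) := by
  unfold Pre_optimize_damage; infer_instance
def pvWitness_optimize_damage : Int := 6

-- For 0 ≤ total_companies < 6 A's plan contains spurious zero-valued raw-material entries
-- left behind by defaultdict probes of unaffordable products; B returns only the companies
-- actually allocated, which is the intended plan.
def D_optimize_damage (total_companies : Int) : Prop :=
  0 ≤ total_companies ∧ total_companies < 6
instance (total_companies : Int) : Decidable (D_optimize_damage total_companies) := by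
  unfold D_optimize_damage; infer_instance

def Spec_optimize_damage (total_companies : Int) (out : List (String × Int)) : Prop :=
  ¬ D_optimize_damage total_companies → out = optimize_damage_alt total_companies
instance (total_companies : Int) (out : List (String × Int)) :
    Decidable (Spec_optimize_damage total_companies out) := by
  unfold Spec_optimize_damage; infer_instance

def pvDiffWitness_optimize_damage : Int := 0
def pvDiffWitnessOut_optimize_damage : (List (String × Int)) × (List (String × Int)) :=
  ([("Grain", 0), ("Livestock", 0), ("Fish", 0), ("Lead", 0), ("Steel", 0),
    ("Mysterious Plant", 0)], [])

-- ===== CLAIM (what is proved, stated in full; the proofs are below) =====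
def Claim_unchanged_optimize_damage : Prop := ∀ (total_companies : Int),
  Dom_optimize_damage total_companies → Pre_optimize_damage total_companies →
  Spec_optimize_damage total_companies (optimize_damage total_companies)
def Claim_changed_optimize_damage : Prop :=
  Dom_optimize_damage pvDiffWitness_optimize_damage ∧
  Pre_optimize_damage pvDiffWitness_optimize_damage ∧
  D_optimize_damage pvDiffWitness_optimize_damage ∧
  optimize_damage pvDiffWitness_optimize_damage = pvDiffWitnessOut_optimize_damage.1 ∧
  optimize_damage_alt pvDiffWitness_optimize_damage = pvDiffWitnessOut_optimize_damage.2 ∧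
  pvDiffWitnessOut_optimize_damage.1 ≠ pvDiffWitnessOut_optimize_damage.2
def Claim_exact_optimize_damage : Prop := ∀ (total_companies : Int),
  Dom_optimize_damage total_companies → Pre_optimize_damage total_companies →
  D_optimize_damage total_companies →
  optimize_damage total_companies ≠ optimize_damage_alt total_companies

-- ===== LEMMAS AND PROOFS =====

-- concrete plan states reached by A's cascade (proof-only helpers)
def pvDB : PySem.Dict String Int :=
  PySem.Dict.ofList [("Grain", 1), ("Bread", 1)]
def pvDBA : PySem.Dict String Int :=
  PySem.Dict.ofList [("Grain", 1), ("Bread", 1), ("Lead", 1), ("Heavy Ammo", 1)]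
def pvL2 : PySem.Dict String Int :=
  PySem.Dict.ofList [("Grain", 1), ("Bread", 1), ("Lead", 1), ("Heavy Ammo", 1),
    ("Mysterious Plant", 0)]
def pvP6 : PySem.Dict String Int :=
  PySem.Dict.ofList [("Grain", 1), ("Bread", 1), ("Lead", 1), ("Heavy Ammo", 1),
    ("Mysterious Plant", 1), ("Pill", 1)]
def pvPS (j : Int) : PySem.Dict String Int :=
  PySem.Dict.ofList [("Grain", 1), ("Bread", 1), ("Lead", 1), ("Heavy Ammo", 1),
    ("Mysterious Plant", 1), ("Pill", 1), ("Steel", j), ("Iron", j)]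

theorem pvMoneyLoop_eq (plan : PySem.Dict String Int) (rem : Int) :
    pvMoneyLoop plan rem =
      if 2 ≤ rem then pvMoneyLoop (pvAddProductWithMaterials plan "Steel") (rem - 2)
      else plan := by
  rw [pvMoneyLoop.eq_def]
  split_ifs with h h2 h3 <;> first | rfl | omega

theorem pvStage1_pos (n : Int) (h : 2 ≤ n) :
    pvTryFirst PySem.Dict.empty n ["Bread", "Steak", "Cooked Fish"] = (pvDB, n - 2) := by
  simp only [pvTryFirst]
  show (if 2 ≤ n then (pvDB, n - 2) else _) = (pvDB, n - 2)
  rw [if_pos h]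

theorem pvStage2_pos (rem : Int) (h : 2 ≤ rem) :
    pvTryFirst pvDB rem ["Heavy Ammo", "Medium Ammo", "Light Ammo"] = (pvDBA, rem - 2) := by
  simp only [pvTryFirst]
  show (if 2 ≤ rem then (pvDBA, rem - 2) else _) = (pvDBA, rem - 2)
  rw [if_pos h]

theorem pvMoney_ps (m : Nat) (j rem : Int) (h0 : 0 ≤ rem) (hm : rem ≤ (m : Int)) :
    pvMoneyLoop (pvPS j) rem = pvPS (j + rem / 2) := by
  induction m generalizing j rem with
  | zero =>
      have hz : rem = 0 := by omega
      subst hz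
      rw [pvMoneyLoop_eq, if_neg (by omega)]
      norm_num
  | succ m ih =>
      by_cases h2 : 2 ≤ rem
      · rw [pvMoneyLoop_eq, if_pos h2,
          show pvAddProductWithMaterials (pvPS j) "Steel" = pvPS (j + 1) from rfl,
          ih (j + 1) (rem - 2) (by omega) (by omega),
          show j + 1 + (rem - 2) / 2 = j + rem / 2 from by omega]
      · rw [pvMoneyLoop_eq, if_neg h2,
          show j + rem / 2 = j from by omega]


def pvDF : PySem.Dict String Int :=
  PySem.Dict.ofList [("Grain", 0), ("Livestock", 0), ("Fish", 0)]
def pvDFA : PySem.Dict String Int :=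
  PySem.Dict.ofList [("Grain", 0), ("Livestock", 0), ("Fish", 0), ("Lead", 0), ("Steel", 0)]
def pvDBA0 : PySem.Dict String Int :=
  PySem.Dict.ofList [("Grain", 1), ("Bread", 1), ("Lead", 0), ("Steel", 0)]
def pvL0 : PySem.Dict String Int :=
  PySem.Dict.ofList [("Grain", 0), ("Livestock", 0), ("Fish", 0), ("Lead", 0), ("Steel", 0),
    ("Mysterious Plant", 0)]
def pvL1 : PySem.Dict String Int :=
  PySem.Dict.ofList [("Grain", 1), ("Bread", 1), ("Lead", 0), ("Steel", 0),
    ("Mysterious Plant", 0)]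

theorem pvStage1_neg (n : Int) (h : ¬ 2 ≤ n) :
    pvTryFirst PySem.Dict.empty n ["Bread", "Steak", "Cooked Fish"] = (pvDF, n) := by
  simp only [pvTryFirst]
  show (if 2 ≤ n then _ else if 2 ≤ n then _ else if 2 ≤ n then _ else (pvDF, n)) = (pvDF, n)
  simp only [if_neg h]

theorem pvStage2_neg (rem : Int) (h : ¬ 2 ≤ rem) :
    pvTryFirst pvDB rem ["Heavy Ammo", "Medium Ammo", "Light Ammo"] = (pvDBA0, rem) := by
  simp only [pvTryFirst]
  show (if 2 ≤ rem then _ else if 3 ≤ rem then _ else if 2 ≤ rem then _ else (pvDBA0, rem))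
      = (pvDBA0, rem)
  simp only [if_neg h, if_neg (show ¬ (3:Int) ≤ rem from by omega)]

theorem pvStage2f_neg (rem : Int) (h : ¬ 2 ≤ rem) :
    pvTryFirst pvDF rem ["Heavy Ammo", "Medium Ammo", "Light Ammo"] = (pvDFA, rem) := by
  simp only [pvTryFirst]
  show (if 2 ≤ rem then _ else if 3 ≤ rem then _ else if 2 ≤ rem then _ else (pvDFA, rem))
      = (pvDFA, rem)
  simp only [if_neg h, if_neg (show ¬ (3:Int) ≤ rem from by omega)]

theorem pvA_lt2 (n : Int) (h : ¬ 2 ≤ n) :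
    optimize_damage n =
      [("Grain", 0), ("Livestock", 0), ("Fish", 0), ("Lead", 0), ("Steel", 0),
       ("Mysterious Plant", 0)] := by
  unfold optimize_damage
  simp only
  rw [pvStage1_neg n h, pvStage2f_neg n h]
  dsimp only
  rw [show pvCountRequired pvDFA "Pill" = (2, pvL0) from rfl, if_neg h]
  dsimp only
  rw [pvMoneyLoop_eq, if_neg h]
  rfl

theorem pvA_24 (n : Int) (h2 : 2 ≤ n) (h4 : ¬ 4 ≤ n) :
    optimize_damage n =
      [("Grain", 1), ("Bread", 1), ("Lead", 0), ("Steel", 0), ("Mysterious Plant", 0)] := by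
  unfold optimize_damage
  simp only
  rw [pvStage1_pos n h2, pvStage2_neg (n - 2) (by omega)]
  dsimp only
  rw [show pvCountRequired pvDBA0 "Pill" = (2, pvL1) from rfl,
    if_neg (by omega : ¬ (2:Int) ≤ n - 2)]
  dsimp only
  rw [pvMoneyLoop_eq, if_neg (by omega : ¬ (2:Int) ≤ n - 2)]
  rfl

theorem pvA_46 (n : Int) (h4 : 4 ≤ n) (h6 : ¬ 6 ≤ n) :
    optimize_damage n =
      [("Grain", 1), ("Bread", 1), ("Lead", 1), ("Heavy Ammo", 1),
       ("Mysterious Plant", 0)] := by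
  unfold optimize_damage
  simp only
  rw [pvStage1_pos n (by omega), pvStage2_pos (n - 2) (by omega)]
  dsimp only
  rw [show pvCountRequired pvDBA "Pill" = (2, pvL2) from rfl,
    if_neg (by omega : ¬ (2:Int) ≤ n - 2 - 2)]
  dsimp only
  rw [pvMoneyLoop_eq, if_neg (by omega : ¬ (2:Int) ≤ n - 2 - 2)]
  rfl

theorem pvB_lt2 (n : Int) (h : ¬ 2 ≤ n) :
    optimize_damage_alt n = [] := by
  unfold optimize_damage_alt
  simp only
  rw [if_neg (by omega : ¬ n ≥ 2)]
  dsimp only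
  rw [if_neg (by omega : ¬ n ≥ 2)]
  dsimp only
  rw [if_neg (by omega : ¬ n ≥ 2)]
  dsimp only
  rw [PySem.Int.floordiv_eq_ediv_of_pos (by norm_num : (0:Int) < 2),
    if_neg (by omega : ¬ (0:Int) < n / 2)]
  rfl

theorem pvB_24 (n : Int) (h2 : 2 ≤ n) (h4 : ¬ 4 ≤ n) :
    optimize_damage_alt n = [("Grain", 1), ("Bread", 1)] := by
  unfold optimize_damage_alt
  simp only
  rw [if_pos (by omega : n ≥ 2)]
  dsimp only
  rw [if_neg (by omega : ¬ n - 2 ≥ 2)]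
  dsimp only
  rw [if_neg (by omega : ¬ n - 2 ≥ 2)]
  dsimp only
  rw [PySem.Int.floordiv_eq_ediv_of_pos (by norm_num : (0:Int) < 2),
    if_neg (by omega : ¬ (0:Int) < (n - 2) / 2)]
  rfl

theorem pvB_46 (n : Int) (h4 : 4 ≤ n) (h6 : ¬ 6 ≤ n) :
    optimize_damage_alt n =
      [("Grain", 1), ("Bread", 1), ("Lead", 1), ("Heavy Ammo", 1)] := by
  unfold optimize_damage_alt
  simp only
  rw [if_pos (by omega : n ≥ 2)]
  dsimp only
  rw [if_pos (by omega : n - 2 ≥ 2)]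
  dsimp only
  rw [if_neg (by omega : ¬ n - 2 - 2 ≥ 2)]
  dsimp only
  rw [PySem.Int.floordiv_eq_ediv_of_pos (by norm_num : (0:Int) < 2),
    if_neg (by omega : ¬ (0:Int) < (n - 2 - 2) / 2)]
  rfl

-- ===== VERDICT (by name: the statements are the Claim_ definitions above) =====
theorem optimize_damage_spec : Claim_unchanged_optimize_damage := by
  intro n _ hpre hnd
  have h6 : 6 ≤ n := by
    unfold D_optimize_damage at hnd
    unfold Pre_optimize_damage at hpre
    omega
  unfold optimize_damage optimize_damage_alt
  simp only
  rw [pvStage1_pos n (by omega), pvStage2_pos (n - 2) (by omega)]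
  dsimp only
  rw [show pvCountRequired pvDBA "Pill" = (2, pvL2) from rfl,
    if_pos (by omega : (2:Int) ≤ n - 2 - 2)]
  dsimp only
  rw [show pvAddProduct pvL2 "Pill" = pvP6 from rfl,
    show n - 2 - 2 - 2 = n - 6 from by omega,
    if_pos (by omega : n ≥ 2)]
  dsimp only
  rw [if_pos (by omega : n - 2 ≥ 2)]
  dsimp only
  rw [if_pos (by omega : n - 2 - 2 ≥ 2), show n - 2 - 2 - 2 = n - 6 from by omega]
  dsimp only
  rw [PySem.Int.floordiv_eq_ediv_of_pos (by norm_num : (0:Int) < 2)]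
  by_cases h8 : 8 ≤ n
  · rw [pvMoneyLoop_eq, if_pos (by omega : (2:Int) ≤ n - 6),
      show pvAddProductWithMaterials pvP6 "Steel" = pvPS 1 from rfl,
      pvMoney_ps (n - 8).toNat 1 (n - 6 - 2) (by omega) (by omega),
      show (1 + (n - 6 - 2) / 2 : Int) = (n - 6) / 2 from by omega,
      if_pos (by omega : (0:Int) < (n - 6) / 2)]
    rfl
  · rw [pvMoneyLoop_eq, if_neg (by omega : ¬ (2:Int) ≤ n - 6),
      if_neg (by omega : ¬ (0:Int) < (n - 6) / 2)]
    rfl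

theorem optimize_damage_changed : Claim_changed_optimize_damage := by
  unfold Claim_changed_optimize_damage
  refine ⟨by decide, by decide, by decide, ?_, ?_, by decide⟩
  · exact pvA_lt2 0 (by omega)
  · exact pvB_lt2 0 (by omega)

theorem optimize_damage_tight : Claim_exact_optimize_damage := by
  intro n _ hpre hd
  unfold D_optimize_damage at hd
  by_cases h2 : 2 ≤ n
  · by_cases h4 : 4 ≤ n
    · rw [pvA_46 n h4 (by omega), pvB_46 n h4 (by omega)]; decide
    · rw [pvA_24 n h2 h4, pvB_24 n h2 h4]; decide
  · rw [pvA_lt2 n h2, pvB_lt2 n h2]; decide
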